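-- pv_equiv track=rewrite | github.com/billchen0/I-CARE | prepare_epochs.py | segment_hours_into_epochs
-- ===== SOURCE A (Python) =====
-- def segment_hours_into_epochs(hour_list):
--     # Initialize a list of 12 epochs with None
--     epochs = [None] * 12
--
--     start_idx = None
--     current_epoch = None
--
--     for idx, hour in enumerate(hour_list):
--         # Determine which epoch the hour belongs to
--         epoch_idx = hour // 6
--
--         # If we're starting a new epoch or at the beginning of the list
--         if current_epoch is None or current_epoch != epoch_idx:
--             # If we have a starting index, this means we just finished an epoch
--             if start_idx is not None:
--                 epochs[current_epoch] = (start_idx, idx - 1)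
--             start_idx = idx
--             current_epoch = epoch_idx
--
--     # Handle the case for the last hour in the list
--     if start_idx is not None:
--         epochs[current_epoch] = (start_idx, len(hour_list) - 1)
--
--     return epochs
-- ===== SOURCE B (Python) =====
-- def _runs(keys, i):
--     # run-length decomposition of keys starting at absolute index i:
--     # returns a list of (key, start, end) triples for each maximal run
--     if not keys:
--         return []
--     rest = keys[1:]
--     m = 0
--     while m < len(rest) and rest[m] == keys[0]:
--         m += 1
--     return [(keys[0], i, i + m)] + _runs(rest[m:], i + m + 1)
--
--
-- def segment_hours_into_epochs(hour_list):
--     keys = [h // 6 for h in hour_list]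
--     epochs = [None] * 12
--     for k, s, e in _runs(keys, 0):
--         epochs[k] = (s, e)
--     return epochs
-- ===== Notes on version B (the rewrite author's own statement) =====
-- stated objective: alternative
-- what changed: A's single stateful pass with deferred writes (start_idx/current_epoch bookkeeping plus a trailing flush) is replaced by an explicit recursive run-length decomposition of the hour//6 keys into (epoch, start, end) triples followed by a separate assignment pass.
import Mathlib
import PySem

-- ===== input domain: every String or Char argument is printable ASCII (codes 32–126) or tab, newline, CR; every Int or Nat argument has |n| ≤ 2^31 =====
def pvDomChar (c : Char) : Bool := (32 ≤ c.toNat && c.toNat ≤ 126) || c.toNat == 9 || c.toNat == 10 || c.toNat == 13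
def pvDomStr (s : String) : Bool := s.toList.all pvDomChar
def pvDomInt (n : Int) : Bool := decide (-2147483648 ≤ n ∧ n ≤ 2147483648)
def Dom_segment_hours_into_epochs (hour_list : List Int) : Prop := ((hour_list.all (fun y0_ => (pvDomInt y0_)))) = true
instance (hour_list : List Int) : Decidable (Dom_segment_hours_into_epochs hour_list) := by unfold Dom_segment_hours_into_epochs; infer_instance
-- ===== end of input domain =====

-- B replaces A's deferred-write state machine by an explicit run-length decomposition
-- (recursive list of (epoch, start, end) runs) followed by one assignment pass: alternative decomposition, same cost.

-- ===== PORT A =====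
-- loop body of A's 'for idx, hour in enumerate(hour_list)'; state = (epochs, start_idx, current_epoch).
-- (in A, start_idx ≠ None always comes with current_epoch ≠ None, so matching on both is exact)
def pvStepA (st : List (Option (Int × Int)) × Option Int × Option Int) (p : Int × Int) :
    List (Option (Int × Int)) × Option Int × Option Int :=
  let epoch_idx := PySem.Int.floordiv p.2 6
  if st.2.2 = none ∨ st.2.2 ≠ some epoch_idx then
    match st.2.1, st.2.2 with
    | some s, some c => (PySem.List.pySetD st.1 c (some (s, p.1 - 1)), some p.1, some epoch_idx)
    | _, _ => (st.1, some p.1, some epoch_idx)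
  else st

-- A's trailing 'if start_idx is not None: epochs[current_epoch] = (start_idx, len(hour_list) - 1)'
def pvFinA (m : Int) (st : List (Option (Int × Int)) × Option Int × Option Int) :
    List (Option (Int × Int)) :=
  match st.2.1, st.2.2 with
  | some s, some c => PySem.List.pySetD st.1 c (some (s, m - 1))
  | _, _ => st.1

def segment_hours_into_epochs (hour_list : List Int) : List (Option (Int × Int)) :=
  pvFinA (hour_list.length : Int)
    ((PySem.List.enumerate hour_list 0).foldl pvStepA (List.replicate 12 none, none, none))

-- ===== PORT B =====
-- the 'while m < len(rest) and rest[m] == keys[0]: m += 1' loop of Source B, counting leading equals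
def pvCountLeading (c : Int) : List Int → Nat
  | [] => 0
  | x :: xs => if x = c then pvCountLeading c xs + 1 else 0

-- Source B's recursive _runs(keys, i): run-length decomposition into (key, start, end)
def pvRuns : List Int → Int → List (Int × Int × Int)
  | [], _ => []
  | k :: rest, i =>
    let m := pvCountLeading k rest
    (k, i, i + (m : Int)) :: pvRuns (rest.drop m) (i + (m : Int) + 1)
termination_by ks _ => ks.length
decreasing_by simp only [List.length_drop, List.length_cons]; omega

def segment_hours_into_epochs_alt (hour_list : List Int) : List (Option (Int × Int)) :=
  let keys := hour_list.map (fun h => PySem.Int.floordiv h 6)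
  (pvRuns keys 0).foldl
    (fun epochs r => PySem.List.pySetD epochs r.1 (some (r.2.1, r.2.2)))
    (List.replicate 12 none)

-- ===== PRECONDITION & SPEC =====
-- Pre_ excludes exactly the inputs where Python A raises IndexError: some hour // 6 outside [-12, 12).
def Pre_segment_hours_into_epochs (hour_list : List Int) : Prop :=
  ∀ h ∈ hour_list, -72 ≤ h ∧ h < 72
instance (hour_list : List Int) : Decidable (Pre_segment_hours_into_epochs hour_list) := by
  unfold Pre_segment_hours_into_epochs; infer_instance

def pvWitness_segment_hours_into_epochs : List Int := [-3, 0, 6, 6, 70, 0]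

def Spec_segment_hours_into_epochs (hour_list : List Int) (out : List (Option (Int × Int))) : Prop := out = segment_hours_into_epochs_alt hour_list
instance (hour_list : List Int) (out : List (Option (Int × Int))) : Decidable (Spec_segment_hours_into_epochs hour_list out) := by unfold Spec_segment_hours_into_epochs; infer_instance

-- ===== CLAIM (what is proved, stated in full; the proofs are below) =====
def Claim_equal_segment_hours_into_epochs : Prop := ∀ (hour_list : List Int), Dom_segment_hours_into_epochs hour_list → Pre_segment_hours_into_epochs hour_list → Spec_segment_hours_into_epochs hour_list (segment_hours_into_epochs hour_list)

-- ===== LEMMAS AND PROOFS =====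

-- the common write step
def pvWr (E : List (Option (Int × Int))) (r : Int × Int × Int) : List (Option (Int × Int)) :=
  PySem.List.pySetD E r.1 (some (r.2.1, r.2.2))

-- runs of a key list, carried as A carries them: current run (key c, start s), next index n
def pvRunsCont (c s n : Int) : List Int → List (Int × Int × Int)
  | [] => [(c, s, n - 1)]
  | k :: ks => if k = c then pvRunsCont c s (n + 1) ks
               else (c, s, n - 1) :: pvRunsCont k n (n + 1) ks

lemma pvLoopA_eq (l : List Int) : ∀ (n : Int) (E : List (Option (Int × Int))) (s c : Int),
    pvFinA (n + l.length) ((PySem.List.enumerate l n).foldl pvStepA (E, some s, some c))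
      = List.foldl pvWr E (pvRunsCont c s n (l.map (fun h => PySem.Int.floordiv h 6))) := by
  induction l with
  | nil =>
    intro n E s c
    simp [PySem.List.enumerate_nil, pvFinA, pvRunsCont, pvWr]
  | cons h t ih =>
    intro n E s c
    rw [PySem.List.enumerate_cons]
    simp only [List.foldl_cons, List.map_cons, List.length_cons]
    have hcast : (n + ((t.length + 1 : Nat) : Int)) = (n + 1) + (t.length : Int) := by
      push_cast; ring
    rw [hcast]
    by_cases hk : PySem.Int.floordiv h 6 = c
    · have hcond : ¬(((some c : Option Int) = none)
          ∨ (some c : Option Int) ≠ some (PySem.Int.floordiv h 6)) :=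
        not_or.mpr ⟨Option.some_ne_none c,
          not_not_intro (congrArg some hk.symm)⟩
      have hstep : pvStepA (E, some s, some c) (n, h) = (E, some s, some c) := by
        simp only [pvStepA]
        exact if_neg hcond
      rw [hstep, pvRunsCont, if_pos hk]
      exact ih (n + 1) E s c
    · have hcond : ((some c : Option Int) = none)
          ∨ (some c : Option Int) ≠ some (PySem.Int.floordiv h 6) :=
        Or.inr (fun hc => hk (Option.some.inj hc).symm)
      have hstep : pvStepA (E, some s, some c) (n, h)
          = (PySem.List.pySetD E c (some (s, n - 1)), some n, some (PySem.Int.floordiv h 6)) := by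
        simp only [pvStepA]
        rw [if_pos hcond]
      rw [hstep, pvRunsCont, if_neg hk, List.foldl_cons]
      exact ih (n + 1) (PySem.List.pySetD E c (some (s, n - 1))) n (PySem.Int.floordiv h 6)

lemma pvRunsCont_eq_pvRuns (ks : List Int) : ∀ (c s n : Int),
    pvRunsCont c s n ks
      = (c, s, n + (pvCountLeading c ks : Int) - 1)
          :: pvRuns (ks.drop (pvCountLeading c ks)) (n + (pvCountLeading c ks : Int)) := by
  induction ks with
  | nil => intro c s n; simp [pvRunsCont, pvCountLeading, pvRuns]
  | cons k ks' ih =>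
    intro c s n
    by_cases hk : k = c
    · subst hk
      rw [pvRunsCont, if_pos rfl, ih k s (n + 1)]
      have hcl : pvCountLeading k (k :: ks') = pvCountLeading k ks' + 1 := by
        simp [pvCountLeading]
      rw [hcl, List.drop_succ_cons]
      have e1 : n + 1 + (pvCountLeading k ks' : Int)
          = n + ((pvCountLeading k ks' + 1 : Nat) : Int) := by push_cast; ring
      rw [e1]
    · rw [pvRunsCont, if_neg hk]
      have hcl : pvCountLeading c (k :: ks') = 0 := by
        simp [pvCountLeading, hk]
      rw [hcl]
      simp only [Nat.cast_zero, add_zero, List.drop_zero]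
      congr 1
      rw [ih k n (n + 1)]
      simp only [pvRuns]
      have e1 : n + 1 + (pvCountLeading k ks' : Int) - 1
          = n + (pvCountLeading k ks' : Int) := by ring
      have e2 : n + 1 + (pvCountLeading k ks' : Int)
          = n + (pvCountLeading k ks' : Int) + 1 := by ring
      rw [e1, e2]

lemma pvA_eq_runs (hour_list : List Int) :
    segment_hours_into_epochs hour_list
      = List.foldl pvWr (List.replicate 12 none)
          (pvRuns (hour_list.map (fun h => PySem.Int.floordiv h 6)) 0) := by
  cases hour_list with
  | nil =>
    simp [segment_hours_into_epochs, PySem.List.enumerate_nil, pvRuns, pvFinA]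
  | cons h t =>
    have hfirst : pvStepA (List.replicate 12 none, none, none) (0, h)
        = (List.replicate 12 none, some 0, some (PySem.Int.floordiv h 6)) := by
      simp [pvStepA]
    rw [segment_hours_into_epochs, PySem.List.enumerate_cons, List.foldl_cons, hfirst, zero_add]
    have hlen : (((h :: t).length : Nat) : Int) = 1 + (t.length : Int) := by
      push_cast [List.length_cons]; ring
    rw [hlen, pvLoopA_eq t 1 (List.replicate 12 none) 0 (PySem.Int.floordiv h 6)]
    rw [List.map_cons, pvRunsCont_eq_pvRuns]
    simp only [pvRuns]
    set m := pvCountLeading (PySem.Int.floordiv h 6)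
      (t.map (fun h => PySem.Int.floordiv h 6)) with hm
    have e1 : (1 : Int) + (m : Int) - 1 = 0 + (m : Int) := by ring
    have e2 : (1 : Int) + (m : Int) = 0 + (m : Int) + 1 := by ring
    rw [e1, e2]

-- ===== VERDICT (by name: the statement is the Claim_ definition above) =====
theorem segment_hours_into_epochs_spec : Claim_equal_segment_hours_into_epochs := by
  intro hour_list _ _
  unfold Spec_segment_hours_into_epochs
  rw [pvA_eq_runs]
  rfl
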